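-- pv_equiv track=rewrite | github.com/emerging-welfare/kAlpha | kAlpha.py | resolve_entity_discontinuity
-- ===== SOURCE A (Python) =====
-- def resolve_entity_discontinuity(entity_ids):
--     """
--     entity_ids is a sorted list of sentence and word ids of the entity.
--     If tokens in the entity span are discontinuous, divides into multiple continuous parts.
--     Returns a list of entities, each containing entity ids.
--     """
--
--     if len(entity_ids) == 1:
--         return [entity_ids]
--
--     entities = []
--     idx = 0
--     up_to_idx = 0
--     while idx < len(entity_ids) - 1:
--         curr_word_id = entity_ids[idx][1]
--         next_word_id = entity_ids[idx+1][1]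
--
--         if curr_word_id + 1 != next_word_id: # if there is a discontinuity
--             entities.append(entity_ids[up_to_idx:idx+1])
--             up_to_idx = idx+1
--
--         idx += 1
--
--     entities.append(entity_ids[up_to_idx:])
--
--     return entities
-- ===== SOURCE B (Python) =====
-- def resolve_entity_discontinuity(entity_ids):
--     """Element-wise grouping: grow the current (last) group token by token,
--     opening a fresh group whenever the new token's word id is not the
--     successor of the group's last word id. No indices, no slices."""
--     groups = [[]]
--     for tok in entity_ids:
--         last = groups[-1]
--         if last and last[-1][1] + 1 != tok[1]:
--             groups.append([tok])
--         else:
--             last.append(tok)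
--     return groups
-- ===== Notes on version B (the rewrite author's own statement) =====
-- stated objective: alternative
-- what changed: Replaces A's index-based while loop that detects breaks between adjacent positions and emits slices entity_ids[up_to:idx+1] with an element-wise fold that never indexes or slices: it grows the current group token by token and opens a fresh group when the incoming token does not continue it; the empty-input and singleton outputs fall out of the fold's seed with no special case.
import Mathlib
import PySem

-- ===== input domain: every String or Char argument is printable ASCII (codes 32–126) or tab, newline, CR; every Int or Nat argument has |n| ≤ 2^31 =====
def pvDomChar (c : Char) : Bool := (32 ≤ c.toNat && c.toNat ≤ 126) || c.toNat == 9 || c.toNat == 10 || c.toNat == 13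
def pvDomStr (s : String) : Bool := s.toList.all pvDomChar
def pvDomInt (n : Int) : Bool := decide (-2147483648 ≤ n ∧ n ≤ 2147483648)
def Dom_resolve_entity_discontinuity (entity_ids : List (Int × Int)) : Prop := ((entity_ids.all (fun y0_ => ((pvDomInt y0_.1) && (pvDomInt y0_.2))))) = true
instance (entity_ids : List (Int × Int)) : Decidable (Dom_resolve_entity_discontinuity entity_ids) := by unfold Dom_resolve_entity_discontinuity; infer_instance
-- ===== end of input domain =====

-- B replaces A's index-scanning while loop that emits slices entity_ids[up_to:idx+1]
-- by an element-wise fold that grows the current group token by token (no indices,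
-- no slices); alternative decomposition, same cost.

-- ===== PORT A =====
-- the while loop of A; indices idx, idx+1 are in range whenever the loop body runs,
-- so entity_ids[·] is read with getD (exact there)
def pvALoop (entity_ids : List (Int × Int)) (idx up_to_idx : Nat)
    (entities : List (List (Int × Int))) : List (List (Int × Int)) :=
  if _h : idx < entity_ids.length - 1 then
    if (entity_ids.getD idx (0, 0)).2 + 1 != (entity_ids.getD (idx + 1) (0, 0)).2 then
      pvALoop entity_ids (idx + 1) (idx + 1)
        (entities ++ [PySem.List.slice entity_ids (some (up_to_idx : Int)) (some ((idx + 1 : Nat) : Int))])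
    else
      pvALoop entity_ids (idx + 1) up_to_idx entities
  else
    entities ++ [PySem.List.slice entity_ids (some (up_to_idx : Int)) none]
termination_by entity_ids.length - 1 - idx

def resolve_entity_discontinuity (entity_ids : List (Int × Int)) : List (List (Int × Int)) :=
  if entity_ids.length == 1 then [entity_ids]
  else pvALoop entity_ids 0 0 []

-- ===== PORT B =====
-- one step of B's for loop: look at the last group; open a new group on a break,
-- otherwise append the token to it
def pvBStep (groups : List (List (Int × Int))) (tok : Int × Int) : List (List (Int × Int)) :=
  let last := groups.getLastD []
  if last ≠ [] ∧ (last.getLastD (0, 0)).2 + 1 ≠ tok.2 then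
    groups ++ [[tok]]
  else
    groups.dropLast ++ [last ++ [tok]]

def resolve_entity_discontinuity_alt (entity_ids : List (Int × Int)) : List (List (Int × Int)) :=
  entity_ids.foldl pvBStep [[]]

-- ===== PRECONDITION & SPEC =====
def Spec_resolve_entity_discontinuity (entity_ids : List (Int × Int)) (out : List (List (Int × Int))) : Prop := out = resolve_entity_discontinuity_alt entity_ids
instance (entity_ids : List (Int × Int)) (out : List (List (Int × Int))) : Decidable (Spec_resolve_entity_discontinuity entity_ids out) := by unfold Spec_resolve_entity_discontinuity; infer_instance

-- ===== CLAIM (what is proved, stated in full; the proofs are below) =====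
def Claim_equal_resolve_entity_discontinuity : Prop := ∀ (entity_ids : List (Int × Int)), Dom_resolve_entity_discontinuity entity_ids → Spec_resolve_entity_discontinuity entity_ids (resolve_entity_discontinuity entity_ids)

-- ===== LEMMAS AND PROOFS =====

-- common reference shape: pvChop prev rest = (continuation of the current group, remaining groups)
def pvChop (prev : Int) : List (Int × Int) → (List (Int × Int)) × List (List (Int × Int))
  | [] => ([], [])
  | x :: r =>
    if prev + 1 ≠ x.2 then
      ([], (x :: (pvChop x.2 r).1) :: (pvChop x.2 r).2)
    else
      (x :: (pvChop x.2 r).1, (pvChop x.2 r).2)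

-- B's fold, started with finished groups `done` and a nonempty current group `cur ++ [p]`
theorem pvBFold_eq (rest : List (Int × Int)) :
    ∀ (done : List (List (Int × Int))) (cur : List (Int × Int)) (p : Int × Int),
      List.foldl pvBStep (done ++ [cur ++ [p]]) rest
        = done ++ ((cur ++ [p] ++ (pvChop p.2 rest).1) :: (pvChop p.2 rest).2) := by
  induction rest with
  | nil => intro done cur p; simp [pvChop]
  | cons x r ih =>
    intro done cur p
    rw [List.foldl_cons]
    have hstep : pvBStep (done ++ [cur ++ [p]]) x
        = if p.2 + 1 ≠ x.2 then (done ++ [cur ++ [p]]) ++ [[x]]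
          else done ++ [(cur ++ [p]) ++ [x]] := by
      simp [pvBStep]
    by_cases hb : p.2 + 1 ≠ x.2
    · rw [hstep, if_pos hb]
      have : (done ++ [cur ++ [p]]) ++ [[x]] = (done ++ [cur ++ [p]]) ++ [([] : List (Int × Int)) ++ [x]] := by simp
      rw [this, ih (done ++ [cur ++ [p]]) [] x]
      simp [pvChop, if_pos hb]
    · rw [hstep, if_neg hb]
      have : done ++ [(cur ++ [p]) ++ [x]] = done ++ [(cur ++ [p]) ++ [x]] := rfl
      rw [ih done (cur ++ [p]) x]
      simp [pvChop, if_neg hb]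

-- B on a nonempty list
theorem pvB_cons (x : Int × Int) (rest : List (Int × Int)) :
    resolve_entity_discontinuity_alt (x :: rest)
      = (x :: (pvChop x.2 rest).1) :: (pvChop x.2 rest).2 := by
  rw [resolve_entity_discontinuity_alt, List.foldl_cons]
  have h0 : pvBStep [[]] x = [] ++ [([] : List (Int × Int)) ++ [x]] := by
    simp [pvBStep]
  rw [h0, pvBFold_eq rest [] [] x]
  simp

-- slice extension on the drop/take form: xs[u:i+1] ++ [xs[i+1]] = xs[u:i+2]
theorem pvSlice_snoc (xs : List (Int × Int)) (u i : Nat) (hu : u ≤ i + 1)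
    (hi : i + 1 < xs.length) :
    (xs.drop u).take (i + 1 - u) ++ [xs.getD (i + 1) (0, 0)]
      = (xs.drop u).take (i + 2 - u) := by
  have h2 : i + 2 - u = (i + 1 - u) + 1 := by omega
  rw [h2, List.take_add_one]
  have : (xs.drop u)[i + 1 - u]? = some (xs.getD (i + 1) (0, 0)) := by
    have hidx : u + (i + 1 - u) = i + 1 := by omega
    rw [List.getElem?_drop, hidx, List.getElem?_eq_getElem hi,
      List.getD_eq_getElem xs (0, 0) hi]
  rw [this]
  rfl

-- A's loop produces the finished groups plus the grouping of the rest
theorem pvALoop_eq (xs : List (Int × Int)) (idx up_to : Nat) (acc : List (List (Int × Int)))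
    (hu : up_to ≤ idx) (hi : idx < xs.length) :
    pvALoop xs idx up_to acc
      = acc ++ (((xs.drop up_to).take (idx + 1 - up_to)
                  ++ (pvChop (xs.getD idx (0, 0)).2 (xs.drop (idx + 1))).1)
                :: (pvChop (xs.getD idx (0, 0)).2 (xs.drop (idx + 1))).2) := by
  by_cases h : idx < xs.length - 1
  · have hdrop : xs.drop (idx + 1) = xs.getD (idx + 1) (0, 0) :: xs.drop (idx + 2) := by
      rw [List.getD_eq_getElem xs (0,0) (by omega)]
      exact List.drop_eq_getElem_cons (by omega)
    rw [pvALoop, dif_pos h, hdrop]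
    by_cases hb : (xs.getD idx (0, 0)).2 + 1 ≠ (xs.getD (idx + 1) (0, 0)).2
    · rw [if_pos (by simpa using hb)]
      rw [pvALoop_eq xs (idx + 1) (idx + 1) _ (le_refl _) (by omega)]
      rw [pvChop, if_pos hb]
      have hsl : (xs.drop (idx + 1)).take (idx + 1 + 1 - (idx + 1))
          = [xs.getD (idx + 1) (0, 0)] := by
        have := pvSlice_snoc xs (idx + 1) idx (le_refl _) (by omega)
        have hz : idx + 1 - (idx + 1) = 0 := by omega
        rw [show idx + 1 + 1 - (idx + 1) = idx + 2 - (idx + 1) from by omega, ← this, hz]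
        simp
      rw [hsl, PySem.List.slice_natCast]
      simp
    · rw [if_neg (by simpa using hb)]
      rw [pvALoop_eq xs (idx + 1) up_to _ (by omega) (by omega)]
      rw [pvChop, if_neg hb]
      rw [show idx + 1 + 1 - up_to = idx + 2 - up_to from by omega,
        ← pvSlice_snoc xs up_to idx (by omega) (by omega)]
      simp
  · have hdrop : xs.drop (idx + 1) = [] := List.drop_eq_nil_of_le (by omega)
    rw [pvALoop, dif_neg h, hdrop, pvChop]
    rw [PySem.List.slice_from_natCast]
    have : (xs.drop up_to).take (idx + 1 - up_to) = xs.drop up_to := by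
      apply List.take_of_length_le
      simp
      omega
    rw [this]
    simp
termination_by xs.length - 1 - idx

-- ===== VERDICT (by name: the statement is the Claim_ definition above) =====
theorem resolve_entity_discontinuity_spec : Claim_equal_resolve_entity_discontinuity := by
  intro xs _
  show resolve_entity_discontinuity xs = resolve_entity_discontinuity_alt xs
  rw [resolve_entity_discontinuity]
  by_cases h1 : xs.length = 1
  · obtain ⟨x, hx⟩ : ∃ x, xs = [x] := by
      cases xs with
      | nil => simp at h1
      | cons a t => cases t with
        | nil => exact ⟨a, rfl⟩
        | cons b r => simp at h1
    subst hx
    simp [resolve_entity_discontinuity_alt, pvBStep]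
  · rw [if_neg (by simpa using h1)]
    cases xs with
    | nil =>
      rw [pvALoop]
      simp [resolve_entity_discontinuity_alt]
    | cons x rest =>
      rw [pvALoop_eq (x :: rest) 0 0 [] (le_refl _) (by simp), pvB_cons]
      simp
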